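-- pv_equiv track=rewrite | github.com/ducduyn31/leetcode | undefined/aws_2.py | processExecution
-- ===== SOURCE A (Python) =====
-- from typing import List
--
-- def processExecution(power: List[int], minPower: [int], maxPower: [int]) -> List[int]:
--     power.sort()
--
--     consumption = []
--     process_count = []
--
--     rng = []
--
--     for i in range(len(minPower)):
--         rng.append(minPower[i])
--         rng.append(maxPower[i] + 1)
--
--     rng.sort()
--     current_power_idx = 0
--
--     for i in range(len(rng) - 1):
--         start = rng[i]
--         end = rng[i + 1]
--
--         current_process_count = 0
--         current_consumption = 0
--
--         while current_power_idx < len(power) and start <= power[current_power_idx] < end: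
--             current_consumption += power[current_power_idx]
--             current_process_count += 1
--             current_power_idx += 1
--
--         consumption.append(current_consumption)
--         process_count.append(current_process_count)
--
--     result = [[0, 0] for _ in range(len(minPower))]
--
--     for i in range(len(rng) - 1):
--         start = rng[i]
--         end = rng[i + 1]
--
--         for j in range(len(minPower)):
--             if minPower[j] <= start < end <= maxPower[j] + 1:
--                 result[j][0] += process_count[i]
--                 result[j][1] += consumption[i]
--
--     return result
-- ===== SOURCE B (Python) =====
-- from typing import List
--
-- def _bisect_left(a, x):
--     lo, hi = 0, len(a)
--     while lo < hi:
--         mid = (lo + hi) // 2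
--         if a[mid] < x:
--             lo = mid + 1
--         else:
--             hi = mid
--     return lo
--
-- def _bisect_right(a, x):
--     lo, hi = 0, len(a)
--     while lo < hi:
--         mid = (lo + hi) // 2
--         if x < a[mid]:
--             hi = mid
--         else:
--             lo = mid + 1
--     return lo
--
-- def processExecution(power: List[int], minPower: [int], maxPower: [int]) -> List[int]:
--     power.sort()
--     prefix = [0]
--     acc = 0
--     for p in power:
--         acc += p
--         prefix.append(acc)
--     result = []
--     for lo, hi in zip(minPower, maxPower):
--         if lo > hi:
--             result.append([0, 0])
--             continue
--         i = _bisect_left(power, lo)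
--         j = _bisect_right(power, hi)
--         result.append([j - i, prefix[j] - prefix[i]])
--     return result
-- ===== Notes on version B (the rewrite author's own statement) =====
-- stated objective: faster
-- what changed: Replaces A's O(Q^2) boundary-segment double loop and stuck-prone linear pointer sweep with sorting power once, a prefix-sum array and two hand-written binary searches per query, answering each [min,max] query in O(log n).
-- intended difference: When some power value lies strictly below every query boundary while another power value lies inside some query's [min,max] range, A's merge pointer gets stuck on the small value and A returns [0, 0] for every query, whereas B returns the intended per-query [count, sum] of the powers in range. — e.g. on processExecution([1, 5], [3], [6]): A returns [[0, 0]], B returns [[1, 5]]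
import Mathlib
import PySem

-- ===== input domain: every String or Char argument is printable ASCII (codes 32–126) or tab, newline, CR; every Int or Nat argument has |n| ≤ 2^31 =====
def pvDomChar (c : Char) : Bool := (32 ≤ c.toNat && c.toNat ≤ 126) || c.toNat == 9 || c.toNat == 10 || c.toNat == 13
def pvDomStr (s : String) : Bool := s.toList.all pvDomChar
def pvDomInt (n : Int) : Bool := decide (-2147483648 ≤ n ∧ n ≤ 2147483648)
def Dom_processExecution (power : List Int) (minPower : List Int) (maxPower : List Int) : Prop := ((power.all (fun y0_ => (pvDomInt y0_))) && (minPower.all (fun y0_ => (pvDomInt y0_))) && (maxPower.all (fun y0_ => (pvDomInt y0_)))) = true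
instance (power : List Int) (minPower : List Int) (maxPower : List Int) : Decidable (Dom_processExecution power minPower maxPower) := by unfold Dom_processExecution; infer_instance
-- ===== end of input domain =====

-- B replaces A's O(Q^2) segment double loop and stuck-prone pointer sweep with sort + prefix sums +
-- binary search per query (objective: faster). Both A and B sort the `power` argument in place
-- (the same observable mutation); the equivalence proved here is about the return value.

-- ===== PORT A =====
-- the inner `while` of A's first loop: consumes sorted powers in [start, e) from index idx
def whileConsume (ps : List Int) (start e : Int) (fuel : Nat) (cons cnt : Int) (idx : Nat) : Int × Int × Nat :=
  match fuel with
  | 0 => (cons, cnt, idx)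
  | fuel + 1 =>
    if idx < ps.length ∧ start ≤ ps.getD idx 0 ∧ ps.getD idx 0 < e then
      whileConsume ps start e fuel (cons + ps.getD idx 0) (cnt + 1) (idx + 1)
    else (cons, cnt, idx)

def processExecution (power : List Int) (minPower : List Int) (maxPower : List Int) : List (List Int) :=
  let ps := PySem.List.sorted power (fun x => x) false
  let rng0 := (List.range minPower.length).foldl
      (fun acc i => acc ++ [minPower.getD i 0] ++ [maxPower.getD i 0 + 1]) []
  let rng := PySem.List.sorted rng0 (fun x => x) false
  let sweep := (List.range (rng.length - 1)).foldl
      (fun (st : List Int × List Int × Nat) i =>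
        let start := rng.getD i 0
        let e := rng.getD (i + 1) 0
        let r := whileConsume ps start e (ps.length - st.2.2) 0 0 st.2.2
        (st.1 ++ [r.1], st.2.1 ++ [r.2.1], r.2.2)) ([], [], 0)
  let consumption := sweep.1
  let processCount := sweep.2.1
  let result0 := (List.range minPower.length).map (fun _ => [(0 : Int), 0])
  (List.range (rng.length - 1)).foldl
    (fun res i =>
      let start := rng.getD i 0
      let e := rng.getD (i + 1) 0
      (List.range minPower.length).foldl
        (fun res j =>
          if minPower.getD j 0 ≤ start ∧ start < e ∧ e ≤ maxPower.getD j 0 + 1 then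
            res.set j [(res.getD j []).getD 0 0 + processCount.getD i 0,
                       (res.getD j []).getD 1 0 + consumption.getD i 0]
          else res) res) result0

-- ===== PORT B =====
-- Source B's hand-written loops `_bisect_left`/`_bisect_right` are the standard bisect algorithm,
-- ported as the prelude's own transliterations PySem.List.bisectLeft / bisectRight
def processExecution_alt (power : List Int) (minPower : List Int) (maxPower : List Int) : List (List Int) :=
  let ps := PySem.List.sorted power (fun x => x) false
  let pre := (ps.foldl (fun (st : List Int × Int) p => (st.1 ++ [st.2 + p], st.2 + p)) ([0], 0)).1
  (minPower.zip maxPower).map (fun q =>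
    if q.1 > q.2 then [0, 0]
    else
      let i := PySem.List.bisectLeft ps q.1
      let j := PySem.List.bisectRight ps q.2
      [((j : Int) - (i : Int)), pre.getD j 0 - pre.getD i 0])

-- ===== PRECONDITION & SPEC =====
-- Pre_ excludes exactly the inputs where A raises IndexError: maxPower shorter than minPower.
def Pre_processExecution (power : List Int) (minPower : List Int) (maxPower : List Int) : Prop :=
  minPower.length ≤ maxPower.length
instance (power : List Int) (minPower : List Int) (maxPower : List Int) : Decidable (Pre_processExecution power minPower maxPower) := by unfold Pre_processExecution; infer_instance

def pvWitness_processExecution : List Int × List Int × List Int := ([1, 2], [1], [2])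

-- When some power value lies strictly below every query boundary while another power value lies
-- inside some query's [min,max] range, A's merge pointer gets stuck on the small value and A
-- returns [0, 0] for every query; B returns the intended per-query [count, sum] of powers in range.
def D_processExecution (power : List Int) (minPower : List Int) (maxPower : List Int) : Prop :=
  power ≠ [] ∧ minPower.zip maxPower ≠ [] ∧
  (∃ p ∈ power, ∀ q ∈ minPower.zip maxPower, p < q.1 ∧ p < q.2 + 1) ∧
  (∃ p ∈ power, ∃ q ∈ minPower.zip maxPower, q.1 ≤ p ∧ p ≤ q.2)
instance (power : List Int) (minPower : List Int) (maxPower : List Int) : Decidable (D_processExecution power minPower maxPower) := by unfold D_processExecution; infer_instance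

def Spec_processExecution (power : List Int) (minPower : List Int) (maxPower : List Int) (out : List (List Int)) : Prop :=
  ¬ D_processExecution power minPower maxPower → out = processExecution_alt power minPower maxPower
instance (power : List Int) (minPower : List Int) (maxPower : List Int) (out : List (List Int)) : Decidable (Spec_processExecution power minPower maxPower out) := by unfold Spec_processExecution; infer_instance

def pvDiffWitness_processExecution : List Int × List Int × List Int := ([1, 5], [3], [6])
def pvDiffWitnessOut_processExecution : (List (List Int)) × (List (List Int)) := ([[0, 0]], [[1, 5]])

-- ===== CLAIM (what is proved, stated in full; the proofs are below) =====
def Claim_unchanged_processExecution : Prop := ∀ (power : List Int) (minPower : List Int) (maxPower : List Int), Dom_processExecution power minPower maxPower → Pre_processExecution power minPower maxPower → Spec_processExecution power minPower maxPower (processExecution power minPower maxPower)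
def Claim_changed_processExecution : Prop := Dom_processExecution (pvDiffWitness_processExecution.1) (pvDiffWitness_processExecution.2.1) (pvDiffWitness_processExecution.2.2) ∧ Pre_processExecution (pvDiffWitness_processExecution.1) (pvDiffWitness_processExecution.2.1) (pvDiffWitness_processExecution.2.2) ∧ D_processExecution (pvDiffWitness_processExecution.1) (pvDiffWitness_processExecution.2.1) (pvDiffWitness_processExecution.2.2) ∧ processExecution (pvDiffWitness_processExecution.1) (pvDiffWitness_processExecution.2.1) (pvDiffWitness_processExecution.2.2) = pvDiffWitnessOut_processExecution.1 ∧ processExecution_alt (pvDiffWitness_processExecution.1) (pvDiffWitness_processExecution.2.1) (pvDiffWitness_processExecution.2.2) = pvDiffWitnessOut_processExecution.2 ∧ pvDiffWitnessOut_processExecution.1 ≠ pvDiffWitnessOut_processExecution.2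

-- ===== LEMMAS AND PROOFS =====

-- the common reference value: per query [lo, hi], the [count, sum] of the sorted powers in range
def refPair (ps : List Int) (lo hi : Int) : List Int :=
  [(ps.countP (fun p => decide (lo ≤ p ∧ p ≤ hi)) : Int),
   (ps.filter (fun p => decide (lo ≤ p ∧ p ≤ hi))).sum]

-- a sorted list splits into three index zones ¬P / P / ¬P; its P-filter is the middle block
theorem filter_eq_drop_take (ps : List Int) (P : Int → Bool) (i j : Nat)
    (hij : i ≤ j) (hj : j ≤ ps.length)
    (h1 : ∀ k (hk : k < ps.length), k < i → ¬ P ps[k] = true)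
    (h2 : ∀ k (hk : k < ps.length), i ≤ k → k < j → P ps[k] = true)
    (h3 : ∀ k (hk : k < ps.length), j ≤ k → ¬ P ps[k] = true) :
    ps.filter P = (ps.take j).drop i := by
  have hsplit : ps = ps.take j ++ ps.drop j := (List.take_append_drop j ps).symm
  have hsplit2 : ps.take j = ps.take i ++ (ps.take j).drop i := by
    have : List.take i (ps.take j) = ps.take i := by
      rw [List.take_take, Nat.min_eq_left hij]
    conv_lhs => rw [← List.take_append_drop i (ps.take j), this]
  have f1 : (ps.take i).filter P = [] := by
    rw [List.filter_eq_nil_iff]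
    intro a ha
    obtain ⟨t, ht, rfl⟩ := List.mem_iff_getElem.mp ha
    have htl : t < i := lt_of_lt_of_le ht (by simp [List.length_take])
    have ht' : t < ps.length := lt_of_lt_of_le htl (le_trans hij hj)
    rw [List.getElem_take]
    exact h1 t ht' htl
  have f2 : ((ps.take j).drop i).filter P = (ps.take j).drop i := by
    rw [List.filter_eq_self]
    intro a ha
    obtain ⟨t, ht, rfl⟩ := List.mem_iff_getElem.mp ha
    have hlen : (ps.take j).length = j := by simp [List.length_take, Nat.min_eq_left hj]
    have hit : i + t < j := by
      have := ht; rw [List.length_drop, hlen] at this; omega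
    have hit' : i + t < ps.length := lt_of_lt_of_le hit hj
    rw [List.getElem_drop]
    rw [List.getElem_take]
    exact h2 (i + t) hit' (Nat.le_add_right i t) hit
  have f3 : (ps.drop j).filter P = [] := by
    rw [List.filter_eq_nil_iff]
    intro a ha
    obtain ⟨t, ht, rfl⟩ := List.mem_iff_getElem.mp ha
    have ht' : j + t < ps.length := by
      have := ht; rw [List.length_drop] at this; omega
    rw [List.getElem_drop]
    exact h3 (j + t) ht' (Nat.le_add_right j t)
  conv_lhs => rw [hsplit, List.filter_append, hsplit2, List.filter_append, f1, f2, f3]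
  simp

-- Source B's prefix loop: the accumulated list is the running sums
theorem prefix_fold (ps : List Int) : ∀ (l : List Int) (a : Int),
    (ps.foldl (fun (st : List Int × Int) p => (st.1 ++ [st.2 + p], st.2 + p)) (l, a))
      = (l ++ (List.range ps.length).map (fun k => a + (ps.take (k+1)).sum), a + ps.sum) := by
  induction ps with
  | nil => intro l a; simp
  | cons p tl ih =>
    intro l a
    simp only [List.foldl_cons, ih (l ++ [a + p]) (a + p), List.length_cons, Prod.mk.injEq]
    constructor
    · rw [List.range_succ_eq_map, List.map_cons, List.map_map, List.append_assoc]
      simp [Function.comp, List.sum_cons, add_assoc]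
    · simp [add_assoc]

theorem prefix_getD (ps : List Int) (k : Nat) (hk : k ≤ ps.length) :
    ((ps.foldl (fun (st : List Int × Int) p => (st.1 ++ [st.2 + p], st.2 + p)) ([0], 0)).1).getD k 0
      = (ps.take k).sum := by
  rw [prefix_fold]
  cases k with
  | zero => simp
  | succ k =>
    have hk' : k < ps.length := hk
    have : ([(0:Int)] ++ (List.range ps.length).map (fun k => 0 + (ps.take (k+1)).sum))
        = (0:Int) :: (List.range ps.length).map (fun k => 0 + (ps.take (k+1)).sum) := rfl
    rw [this, List.getD_cons_succ]
    rw [List.getD_eq_getElem _ _ (by simpa using hk')]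
    simp

theorem alt_eq_ref (power minPower maxPower : List Int) :
    processExecution_alt power minPower maxPower
      = (minPower.zip maxPower).map (fun q =>
          refPair (PySem.List.sorted power (fun x => x) false) q.1 q.2) := by
  unfold processExecution_alt
  set ps := PySem.List.sorted power (fun x => x) false with hps
  have hsorted : List.Pairwise (· ≤ ·) ps := PySem.List.sorted_pairwise power (fun x => x)
  apply List.map_congr_left
  intro q _
  by_cases hq : q.1 > q.2
  · rw [if_pos hq]
    unfold refPair
    have hzero : ∀ p ∈ ps, ¬ (decide (q.1 ≤ p ∧ p ≤ q.2) = true) := by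
      intro p _; simp; omega
    rw [List.countP_eq_zero.mpr hzero, List.filter_eq_nil_iff.mpr hzero]
    simp
  · rw [if_neg hq]
    push_neg at hq
    obtain ⟨hile, hbl1, hbl2⟩ := PySem.List.bisectLeft_spec ps q.1 hsorted
    obtain ⟨hjle, hbr1, hbr2⟩ := PySem.List.bisectRight_spec ps q.2 hsorted
    set i := PySem.List.bisectLeft ps q.1 with hi
    set j := PySem.List.bisectRight ps q.2 with hj
    have hij : i ≤ j := by
      by_contra hc
      push_neg at hc
      have hjlen : j < ps.length := lt_of_lt_of_le hc hile
      have := hbl1 j hjlen hc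
      have := hbr2 j hjlen (le_refl j)
      omega
    have hfil : ps.filter (fun p => decide (q.1 ≤ p ∧ p ≤ q.2)) = (ps.take j).drop i := by
      apply filter_eq_drop_take ps _ i j hij hjle
      · intro k hk hki
        have := hbl1 k hk hki
        simp; omega
      · intro k hk h1 h2
        have := hbl2 k hk h1
        have := hbr1 k hk h2
        simp; omega
      · intro k hk hkj
        have := hbr2 k hk hkj
        simp; omega
    have hsplit2 : ps.take j = ps.take i ++ (ps.take j).drop i := by
      have h : List.take i (ps.take j) = ps.take i := by
        rw [List.take_take, Nat.min_eq_left hij]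
      conv_lhs => rw [← List.take_append_drop i (ps.take j), h]
    have hmidlen : ((ps.take j).drop i).length = j - i := by
      simp [List.length_drop, List.length_take, Nat.min_eq_left hjle]
    unfold refPair
    have hcnt : (ps.countP (fun p => decide (q.1 ≤ p ∧ p ≤ q.2))) = j - i := by
      rw [List.countP_eq_length_filter, hfil, hmidlen]
    have hsum : (ps.filter (fun p => decide (q.1 ≤ p ∧ p ≤ q.2))).sum
        = (ps.take j).sum - (ps.take i).sum := by
      rw [hfil]
      conv_rhs => rw [hsplit2]
      rw [List.sum_append]; ring
    dsimp only
    rw [hcnt, hsum, prefix_getD ps j hjle, prefix_getD ps i hile]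
    congr 1
    omega

-- ---------- zone lemmas: on a sorted list, a downward-closed predicate holds exactly on a prefix ----------
theorem sorted_getElem_mono (ps : List Int) (hs : List.Pairwise (· ≤ ·) ps)
    (a b : Nat) (ha : a < ps.length) (hb : b < ps.length) (hab : a ≤ b) : ps[a] ≤ ps[b] := by
  rcases Nat.lt_or_ge a b with h | h
  · exact List.pairwise_iff_getElem.mp hs a b ha hb h
  · have : a = b := le_antisymm hab h
    subst this; rfl

theorem zone (ps : List Int) (hs : List.Pairwise (· ≤ ·) ps) (P : Int → Bool)
    (hmono : ∀ a b : Int, a ≤ b → P b = true → P a = true)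
    (k : Nat) (hk : k < ps.length) : P ps[k] = true ↔ k < ps.countP P := by
  constructor
  · intro h
    have hsplit : ps.countP P = (ps.take (k+1)).countP P + (ps.drop (k+1)).countP P := by
      rw [← List.countP_append, List.take_append_drop]
    have hlen : (ps.take (k+1)).length = k + 1 := by
      simp [List.length_take]; omega
    have hfull : (ps.take (k+1)).countP P = k + 1 := by
      rw [List.countP_eq_length.mpr ?_, hlen]
      intro a ha
      obtain ⟨t, ht, rfl⟩ := List.mem_iff_getElem.mp ha
      have htk : t ≤ k := by have := ht; rw [hlen] at this; omega
      have ht' : t < ps.length := by omega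
      rw [List.getElem_take]
      exact hmono _ _ (sorted_getElem_mono ps hs t k ht' hk htk) h
    omega
  · intro h
    by_contra hc
    have hx : ∀ a ∈ ps.drop k, ¬ P a = true := by
      intro a ha
      obtain ⟨t, ht, rfl⟩ := List.mem_iff_getElem.mp ha
      rw [List.getElem_drop]
      intro hP
      exact hc (hmono _ _ (sorted_getElem_mono ps hs k (k+t) hk (by
        have := ht; rw [List.length_drop] at this; omega) (Nat.le_add_right _ _)) hP)
    have hsplit : ps.countP P = (ps.take k).countP P + (ps.drop k).countP P := by
      rw [← List.countP_append, List.take_append_drop]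
    have h0 : (ps.drop k).countP P = 0 := List.countP_eq_zero.mpr hx
    have h1 : (ps.take k).countP P ≤ k := le_trans List.countP_le_length (by simp [List.length_take])
    omega

def cLT (ps : List Int) (x : Int) : Nat := ps.countP (fun p => decide (p < x))

theorem cLT_le (ps : List Int) (x : Int) : cLT ps x ≤ ps.length := List.countP_le_length

theorem cLT_mono (ps : List Int) (x y : Int) (h : x ≤ y) : cLT ps x ≤ cLT ps y :=
  List.countP_mono_left (by intro p _ hp; simp at hp ⊢; omega)

theorem zone_lt (ps : List Int) (hs : List.Pairwise (· ≤ ·) ps) (x : Int)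
    (k : Nat) (hk : k < ps.length) : ps[k] < x ↔ k < cLT ps x := by
  have := zone ps hs (fun p => decide (p < x)) (by intro a b hab hb; simp at hb ⊢; omega) k hk
  simpa using this

def cLE (ps : List Int) (x : Int) : Nat := ps.countP (fun p => decide (p ≤ x))

theorem zone_le (ps : List Int) (hs : List.Pairwise (· ≤ ·) ps) (x : Int)
    (k : Nat) (hk : k < ps.length) : ps[k] ≤ x ↔ k < cLE ps x := by
  have := zone ps hs (fun p => decide (p ≤ x)) (by intro a b hab hb; simp at hb ⊢; omega) k hk
  simpa using this

-- ---------- A's inner while loop ----------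
theorem whileConsume_empty (ps : List Int) (s e : Int)
    (hne : ∀ p ∈ ps, ¬ (s ≤ p ∧ p < e)) (fuel : Nat) (c n : Int) (idx : Nat) :
    whileConsume ps s e fuel c n idx = (c, n, idx) := by
  cases fuel with
  | zero => rfl
  | succ f =>
    rw [whileConsume, if_neg]
    rintro ⟨h1, h2, h3⟩
    have hm : ps.getD idx 0 ∈ ps := by
      rw [List.getD_eq_getElem _ _ h1]; exact List.getElem_mem _
    exact hne _ hm ⟨h2, h3⟩

theorem whileConsume_run (ps : List Int) (s e : Int) (j : Nat) (hjle : j ≤ ps.length)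
    (hout : ∀ k (hk : k < ps.length), j ≤ k → ¬ ps[k] < e) :
    ∀ fuel idx (c n : Int), idx ≤ j → ps.length - idx ≤ fuel →
    (∀ k (hk : k < ps.length), idx ≤ k → k < j → s ≤ ps[k] ∧ ps[k] < e) →
    whileConsume ps s e fuel c n idx
      = (c + ((ps.take j).drop idx).sum, n + ((ps.take j).drop idx).length, j) := by
  intro fuel
  induction fuel with
  | zero =>
    intro idx c n hij hfuel hin
    have h1 : idx = j := by have := hjle; omega
    have h2 : ps.length ≤ idx := by omega
    subst h1
    have hnil : (ps.take idx).drop idx = [] :=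
      List.drop_eq_nil_of_le (by simp [List.length_take])
    simp [whileConsume, hnil]
  | succ f ih =>
    intro idx c n hij hfuel hin
    rcases Nat.lt_or_ge idx j with hlt | hge
    · have hidx : idx < ps.length := lt_of_lt_of_le hlt hjle
      have hbounds := hin idx hidx (le_refl idx) hlt
      rw [whileConsume, if_pos (by rw [List.getD_eq_getElem _ _ hidx]; exact ⟨hidx, hbounds.1, hbounds.2⟩)]
      rw [List.getD_eq_getElem _ _ hidx]
      have hrec := ih (idx + 1) (c + ps[idx]) (n + 1) hlt (by omega)
          (fun k hk h1 h2 => hin k hk (by omega) h2)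
      rw [hrec]
      have hcons : (ps.take j).drop idx = ps[idx] :: (ps.take j).drop (idx + 1) := by
        have hidxt : idx < (ps.take j).length := by simp [List.length_take]; omega
        rw [List.drop_eq_getElem_cons hidxt, List.getElem_take]
      rw [hcons]
      simp only [List.sum_cons, List.length_cons, Prod.mk.injEq]
      refine ⟨by ring, by push_cast; ring, trivial⟩
    · have h1 : idx = j := le_antisymm hij hge
      subst h1
      have hnil : (ps.take idx).drop idx = [] :=
        List.drop_eq_nil_of_le (by simp [List.length_take])
      have hcondf : ¬ (idx < ps.length ∧ s ≤ ps.getD idx 0 ∧ ps.getD idx 0 < e) := by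
        rintro ⟨hl, _, hlt'⟩
        rw [List.getD_eq_getElem _ _ hl] at hlt'
        exact hout idx hl (le_refl idx) hlt'
      rw [whileConsume, if_neg hcondf, hnil]
      simp

-- ---------- A's first loop as a named fold ----------
def sweepStep (ps rng : List Int) (st : List Int × List Int × Nat) (i : Nat) :
    List Int × List Int × Nat :=
  let start := rng.getD i 0
  let e := rng.getD (i + 1) 0
  let r := whileConsume ps start e (ps.length - st.2.2) 0 0 st.2.2
  (st.1 ++ [r.1], st.2.1 ++ [r.2.1], r.2.2)

def sw (ps rng : List Int) (K : Nat) : List Int × List Int × Nat :=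
  (List.range K).foldl (sweepStep ps rng) ([], [], 0)

theorem sw_succ (ps rng : List Int) (K : Nat) :
    sw ps rng (K + 1) = sweepStep ps rng (sw ps rng K) K := by
  rw [sw, List.range_succ, List.foldl_append]; rfl

theorem sw_len (ps rng : List Int) (K : Nat) :
    (sw ps rng K).1.length = K ∧ (sw ps rng K).2.1.length = K := by
  induction K with
  | zero => simp [sw]
  | succ K ih =>
    rw [sw_succ]
    unfold sweepStep
    simp [ih.1, ih.2]

theorem sw_getD (ps rng : List Int) (i : Nat) :
    ∀ K, i < K →
      (sw ps rng K).1.getD i 0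
          = (whileConsume ps (rng.getD i 0) (rng.getD (i+1) 0)
              (ps.length - (sw ps rng i).2.2) 0 0 (sw ps rng i).2.2).1
        ∧ (sw ps rng K).2.1.getD i 0
          = (whileConsume ps (rng.getD i 0) (rng.getD (i+1) 0)
              (ps.length - (sw ps rng i).2.2) 0 0 (sw ps rng i).2.2).2.1 := by
  intro K
  induction K with
  | zero => intro h; omega
  | succ K ih =>
    intro hiK
    rcases Nat.lt_or_ge i K with hlt | hge
    · rw [sw_succ]
      unfold sweepStep
      dsimp only
      rw [List.getD_append _ _ _ _ (by rw [(sw_len ps rng K).1]; exact hlt),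
          List.getD_append _ _ _ _ (by rw [(sw_len ps rng K).2]; exact hlt)]
      exact ih hlt
    · have hiK' : i = K := by omega
      subst hiK'
      rw [sw_succ]
      unfold sweepStep
      dsimp only
      rw [List.getD_append_right _ _ _ _ (by rw [(sw_len ps rng i).1]),
          List.getD_append_right _ _ _ _ (by rw [(sw_len ps rng i).2])]
      rw [(sw_len ps rng i).1, (sw_len ps rng i).2]
      simp

-- ---------- A's second loop: the per-query update fold, characterised pointwise ----------
theorem foldset_len (C : Nat → Prop) [DecidablePred C] (a b : Int) (N : Nat) :
    ∀ res : List (List Int),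
      ((List.range N).foldl
        (fun r j => if C j then r.set j [(r.getD j []).getD 0 0 + a, (r.getD j []).getD 1 0 + b] else r)
        res).length = res.length := by
  induction N with
  | zero => intro res; rfl
  | succ N ih =>
    intro res
    rw [List.range_succ, List.foldl_append]
    simp only [List.foldl_cons, List.foldl_nil]
    split
    · rw [List.length_set, ih res]
    · rw [ih res]

theorem foldset_getD (C : Nat → Prop) [DecidablePred C] (a b : Int) (N : Nat) :
    ∀ (res : List (List Int)) (j : Nat),
      ((List.range N).foldl
        (fun r j => if C j then r.set j [(r.getD j []).getD 0 0 + a, (r.getD j []).getD 1 0 + b] else r)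
        res).getD j []
      = if j < N ∧ j < res.length ∧ C j then
          [(res.getD j []).getD 0 0 + a, (res.getD j []).getD 1 0 + b]
        else res.getD j [] := by
  induction N with
  | zero =>
    intro res j
    rw [if_neg (by omega)]
    rfl
  | succ N ih =>
    intro res j
    rw [List.range_succ, List.foldl_append]
    simp only [List.foldl_cons, List.foldl_nil]
    have hlen : ((List.range N).foldl
        (fun r j => if C j then r.set j [(r.getD j []).getD 0 0 + a, (r.getD j []).getD 1 0 + b] else r)
        res).length = res.length := foldset_len C a b N res
    by_cases hCN : C N
    · rw [if_pos hCN]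
      rcases eq_or_ne N j with hNj | hNj
      · subst hNj
        rw [List.getD_eq_getElem?_getD, List.getElem?_set, if_pos rfl, hlen]
        by_cases hNlen : N < res.length
        · rw [if_pos hNlen]
          rw [ih res N, if_neg (by omega)]
          rw [if_pos ⟨by omega, hNlen, hCN⟩]
          rfl
        · rw [if_neg hNlen, if_neg (by omega)]
          simp only [Option.getD_none]
          rw [List.getD_eq_default _ _ (by omega)]
      · rw [List.getD_eq_getElem?_getD, List.getElem?_set, if_neg hNj,
            ← List.getD_eq_getElem?_getD, ih res j]
        rcases Nat.lt_or_ge j N with hjN | hjN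
        · by_cases hrest : j < res.length ∧ C j
          · rw [if_pos ⟨hjN, hrest.1, hrest.2⟩, if_pos ⟨by omega, hrest.1, hrest.2⟩]
          · rw [if_neg (by tauto), if_neg (by
              rintro ⟨_, h2, h3⟩; exact hrest ⟨h2, h3⟩)]
        · rw [if_neg (by omega), if_neg (by omega)]
    · rw [if_neg hCN, ih res j]
      rcases Nat.lt_or_ge j N with hjN | hjN
      · by_cases hrest : j < res.length ∧ C j
        · rw [if_pos ⟨hjN, hrest.1, hrest.2⟩, if_pos ⟨by omega, hrest.1, hrest.2⟩]
        · rw [if_neg (by tauto), if_neg (by rintro ⟨_, h2, h3⟩; exact hrest ⟨h2, h3⟩)]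
      · rw [if_neg (by omega), if_neg (by
          rintro ⟨h1, _, h3⟩
          have : j = N := by omega
          subst this
          exact hCN h3)]

theorem outer_fold (C : Nat → Nat → Prop) [∀ i j, Decidable (C i j)] (A B : Nat → Int)
    (N : Nat) (M : Nat) :
    (((List.range M).foldl
        (fun res i => (List.range N).foldl
          (fun r j => if C i j then r.set j [(r.getD j []).getD 0 0 + A i, (r.getD j []).getD 1 0 + B i] else r)
          res)
        ((List.range N).map (fun _ => ([0, 0] : List Int)))).length = N)
    ∧ ∀ j, j < N →
      ((List.range M).foldl
        (fun res i => (List.range N).foldl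
          (fun r j => if C i j then r.set j [(r.getD j []).getD 0 0 + A i, (r.getD j []).getD 1 0 + B i] else r)
          res)
        ((List.range N).map (fun _ => ([0, 0] : List Int)))).getD j []
      = [((List.range M).map (fun i => if C i j then A i else 0)).sum,
         ((List.range M).map (fun i => if C i j then B i else 0)).sum] := by
  induction M with
  | zero =>
    constructor
    · simp
    · intro j hj
      rw [List.getD_eq_getElem _ _ (by simpa using hj)]
      simp
  | succ M ih =>
    rw [List.range_succ, List.foldl_append]
    simp only [List.foldl_cons, List.foldl_nil]
    constructor
    · rw [foldset_len, ih.1]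
    · intro j hj
      rw [foldset_getD, ih.1, ih.2 j hj]
      rw [List.map_append, List.map_append, List.sum_append, List.sum_append]
      by_cases hC : C M j
      · rw [if_pos ⟨hj, hj, hC⟩]
        simp [hC]
      · rw [if_neg (by tauto)]
        simp [hC]

-- ---------- exchanging the segment sum and the element sum ----------
theorem sum_swap_count (m : Nat) (Sel : Nat → Prop) [DecidablePred Sel]
    (Q : Nat → Int → Prop) [∀ i p, Decidable (Q i p)] :
    ∀ ps : List Int,
      ((List.range m).map (fun i => if Sel i then (ps.countP (fun p => decide (Q i p)) : Int) else 0)).sum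
        = (ps.map (fun p => ((List.range m).map (fun i => if Sel i ∧ Q i p then (1:Int) else 0)).sum)).sum := by
  intro ps
  induction ps with
  | nil =>
    simp only [List.countP_nil, List.map_nil, List.sum_nil]
    apply List.sum_eq_zero
    intro x hx
    obtain ⟨i, _, rfl⟩ := List.mem_map.mp hx
    split <;> simp
  | cons p tl ih =>
    simp only [List.map_cons, List.sum_cons]
    have hpt : ∀ i : Nat,
        (if Sel i then ((tl.countP (fun p' => decide (Q i p')) + if decide (Q i p) = true then 1 else 0 : Nat) : Int) else 0)
        = (if Sel i ∧ Q i p then (1:Int) else 0) + (if Sel i then (tl.countP (fun p' => decide (Q i p')) : Int) else 0) := by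
      intro i
      by_cases h1 : Sel i <;> by_cases h2 : Q i p <;> simp [h1, h2, add_comm]
    calc ((List.range m).map (fun i => if Sel i then ((p :: tl).countP (fun p' => decide (Q i p')) : Int) else 0)).sum
        = ((List.range m).map (fun i =>
            (if Sel i ∧ Q i p then (1:Int) else 0) + (if Sel i then (tl.countP (fun p' => decide (Q i p')) : Int) else 0))).sum := by
          apply congrArg
          apply List.map_congr_left
          intro i _
          rw [List.countP_cons]
          exact hpt i
      _ = _ := by
          rw [PySem.List.sum_map_add_int, ih]

theorem sum_swap_sum (m : Nat) (Sel : Nat → Prop) [DecidablePred Sel]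
    (Q : Nat → Int → Prop) [∀ i p, Decidable (Q i p)] :
    ∀ ps : List Int,
      ((List.range m).map (fun i => if Sel i then (ps.filter (fun p => decide (Q i p))).sum else 0)).sum
        = (ps.map (fun p => ((List.range m).map (fun i => if Sel i ∧ Q i p then p else 0)).sum)).sum := by
  intro ps
  induction ps with
  | nil =>
    simp only [List.filter_nil, List.map_nil, List.sum_nil]
    apply List.sum_eq_zero
    intro x hx
    obtain ⟨i, _, rfl⟩ := List.mem_map.mp hx
    split <;> simp
  | cons p tl ih =>
    simp only [List.map_cons, List.sum_cons]
    calc ((List.range m).map (fun i => if Sel i then ((p :: tl).filter (fun p' => decide (Q i p'))).sum else 0)).sum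
        = ((List.range m).map (fun i =>
            (if Sel i ∧ Q i p then p else 0) + (if Sel i then (tl.filter (fun p' => decide (Q i p'))).sum else 0))).sum := by
          apply congrArg
          apply List.map_congr_left
          intro i _
          rw [List.filter_cons]
          by_cases h1 : Sel i <;> by_cases h2 : Q i p <;> simp [h1, h2, add_comm]
      _ = _ := by
          rw [PySem.List.sum_map_add_int, ih]

theorem sum_map_ite_self (P : Int → Prop) [DecidablePred P] (ps : List Int) :
    (ps.map (fun p => if P p then p else 0)).sum = (ps.filter (fun p => decide (P p))).sum := by
  induction ps with
  | nil => rfl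
  | cons p tl ih =>
    rw [List.map_cons, List.sum_cons, List.filter_cons]
    by_cases h : P p <;> simp [h, ih]

-- ---------- the sweep invariant: without a blocking element the pointer is the count below the boundary ----------
theorem sw_idx (ps rng : List Int) (hs : List.Pairwise (· ≤ ·) ps)
    (hr : List.Pairwise (· ≤ ·) rng) (hblk : ∀ p ∈ ps, rng.getD 0 0 ≤ p) :
    ∀ K, K ≤ rng.length - 1 → (sw ps rng K).2.2 = cLT ps (rng.getD K 0) := by
  intro K
  induction K with
  | zero =>
    intro _
    have : cLT ps (rng.getD 0 0) = 0 := by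
      apply List.countP_eq_zero.mpr
      intro p hp
      have := hblk p hp
      simp only [decide_eq_true_eq]
      omega
    rw [this]; rfl
  | succ K ih =>
    intro hK
    have hKm : K ≤ rng.length - 1 := by omega
    have hKlen : K < rng.length := by omega
    have hK1len : K + 1 < rng.length := by omega
    have hse : rng.getD K 0 ≤ rng.getD (K+1) 0 := by
      rw [List.getD_eq_getElem _ _ hKlen, List.getD_eq_getElem _ _ hK1len]
      exact sorted_getElem_mono rng hr K (K+1) hKlen hK1len (by omega)
    rw [sw_succ]
    unfold sweepStep
    dsimp only
    rw [ih hKm]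
    rw [whileConsume_run ps (rng.getD K 0) (rng.getD (K+1) 0) (cLT ps (rng.getD (K+1) 0))
        (cLT_le _ _)
        (by
          intro k hk hkj
          rw [zone_lt ps hs _ k hk]
          omega)
        _ _ 0 0
        (cLT_mono ps _ _ hse)
        (le_refl _)
        (by
          intro k hk h1 h2
          constructor
          · by_contra hc
            have : ps[k] < rng.getD K 0 := by omega
            rw [zone_lt ps hs _ k hk] at this
            omega
          · rw [zone_lt ps hs _ k hk]
            omega)]

theorem sw_entries (ps rng : List Int) (hs : List.Pairwise (· ≤ ·) ps)
    (hr : List.Pairwise (· ≤ ·) rng) (hblk : ∀ p ∈ ps, rng.getD 0 0 ≤ p)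
    (i : Nat) (hi : i < rng.length - 1) :
    (sw ps rng (rng.length - 1)).2.1.getD i 0
        = (((ps.take (cLT ps (rng.getD (i+1) 0))).drop (cLT ps (rng.getD i 0))).length : Int)
    ∧ (sw ps rng (rng.length - 1)).1.getD i 0
        = ((ps.take (cLT ps (rng.getD (i+1) 0))).drop (cLT ps (rng.getD i 0))).sum := by
  have hilen : i < rng.length := by omega
  have hi1len : i + 1 < rng.length := by omega
  have hse : rng.getD i 0 ≤ rng.getD (i+1) 0 := by
    rw [List.getD_eq_getElem _ _ hilen, List.getD_eq_getElem _ _ hi1len]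
    exact sorted_getElem_mono rng hr i (i+1) hilen hi1len (by omega)
  obtain ⟨hg1, hg2⟩ := sw_getD ps rng i (rng.length - 1) hi
  rw [sw_idx ps rng hs hr hblk i (by omega)] at hg1 hg2
  have hrun := whileConsume_run ps (rng.getD i 0) (rng.getD (i+1) 0) (cLT ps (rng.getD (i+1) 0))
      (cLT_le _ _)
      (by
        intro k hk hkj
        rw [zone_lt ps hs _ k hk]
        omega)
      (ps.length - cLT ps (rng.getD i 0)) (cLT ps (rng.getD i 0)) 0 0
      (cLT_mono ps _ _ hse)
      (le_refl _)
      (by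
        intro k hk h1 h2
        constructor
        · by_contra hc
          have : ps[k] < rng.getD i 0 := by omega
          rw [zone_lt ps hs _ k hk] at this
          omega
        · rw [zone_lt ps hs _ k hk]
          omega)
  rw [hrun] at hg1 hg2
  constructor
  · rw [hg2]; ring
  · rw [hg1]; ring

theorem mid_eq_filter (ps : List Int) (hs : List.Pairwise (· ≤ ·) ps) (s e : Int) (hse : s ≤ e) :
    ps.filter (fun p => decide (s ≤ p ∧ p < e))
      = (ps.take (cLT ps e)).drop (cLT ps s) := by
  apply filter_eq_drop_take ps _ (cLT ps s) (cLT ps e) (cLT_mono ps _ _ hse) (cLT_le _ _)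
  · intro k hk hki
    rw [← zone_lt ps hs s k hk] at hki
    simp
    omega
  · intro k hk h1 h2
    rw [← zone_lt ps hs e k hk] at h2
    have h1' : ¬ ps[k] < s := by
      rw [zone_lt ps hs s k hk]
      omega
    simp
    omega
  · intro k hk hkj
    have : ¬ ps[k] < e := by
      rw [zone_lt ps hs e k hk]
      omega
    simp
    omega

-- ---------- the pointwise partition identity ----------
theorem sum_ite_eq_range (m i0 : Nat) (h : i0 < m) :
    ((List.range m).map (fun i => if i = i0 then (1:Int) else 0)).sum = 1 := by
  induction m with
  | zero => omega
  | succ m ih =>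
    rw [List.range_succ, List.map_append, List.sum_append]
    rcases Nat.lt_or_ge i0 m with hlt | hge
    · rw [ih hlt]
      simp
      omega
    · have hi0 : i0 = m := by omega
      subst hi0
      have hz : ((List.range i0).map (fun i => if i = i0 then (1:Int) else 0)).sum = 0 := by
        apply List.sum_eq_zero
        intro x hx
        obtain ⟨i, hi, rfl⟩ := List.mem_map.mp hx
        rw [List.mem_range] at hi
        rw [if_neg (by omega)]
      rw [hz]
      simp

theorem part_point (rng : List Int) (hr : List.Pairwise (· ≤ ·) rng) (lo hi : Int)
    (ia : Nat) (hia : ia < rng.length) (hial : rng[ia] = lo)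
    (ib : Nat) (hib : ib < rng.length) (hibl : rng[ib] = hi + 1)
    (p : Int) :
    ((List.range (rng.length - 1)).map (fun i =>
        if (lo ≤ rng.getD i 0 ∧ rng.getD i 0 < rng.getD (i+1) 0 ∧ rng.getD (i+1) 0 ≤ hi + 1)
           ∧ (rng.getD i 0 ≤ p ∧ p < rng.getD (i+1) 0) then (1:Int) else 0)).sum
      = if lo ≤ p ∧ p ≤ hi then 1 else 0 := by
  by_cases hp : lo ≤ p ∧ p ≤ hi
  · rw [if_pos hp]
    have hc1 : ia < cLE rng p := by
      rw [← zone_le rng hr p ia hia, hial]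
      exact hp.1
    set c := cLE rng p with hc
    have hcib : c ≤ ib := by
      by_contra hcon
      have : rng[ib] ≤ p := by
        rw [zone_le rng hr p ib hib]
        omega
      rw [hibl] at this
      omega
    have hc0 : 1 ≤ c := by omega
    set i0 := c - 1 with hi0
    have hi0m : i0 < rng.length - 1 := by omega
    have hi0len : i0 < rng.length := by omega
    have hi01len : i0 + 1 < rng.length := by omega
    have hq1 : rng[i0] ≤ p := by
      rw [zone_le rng hr p i0 hi0len]
      omega
    have hq2 : p < rng[i0+1] := by
      by_contra hcon
      have : rng[i0+1] ≤ p := by omega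
      rw [zone_le rng hr p (i0+1) hi01len] at this
      omega
    have hcongr : ∀ i ∈ List.range (rng.length - 1),
        (if (lo ≤ rng.getD i 0 ∧ rng.getD i 0 < rng.getD (i+1) 0 ∧ rng.getD (i+1) 0 ≤ hi + 1)
            ∧ (rng.getD i 0 ≤ p ∧ p < rng.getD (i+1) 0) then (1:Int) else 0)
          = (if i = i0 then (1:Int) else 0) := by
      intro i him
      rw [List.mem_range] at him
      have hil : i < rng.length := by omega
      have hi1l : i + 1 < rng.length := by omega
      by_cases hcond : (lo ≤ rng.getD i 0 ∧ rng.getD i 0 < rng.getD (i+1) 0 ∧ rng.getD (i+1) 0 ≤ hi + 1)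
          ∧ (rng.getD i 0 ≤ p ∧ p < rng.getD (i+1) 0)
      · rw [if_pos hcond]
        obtain ⟨hsel, hqi⟩ := hcond
        rw [List.getD_eq_getElem _ _ hil, List.getD_eq_getElem _ _ hi1l] at hqi
        have hic : i < c := by
          rw [hc, ← zone_le rng hr p i hil]
          exact hqi.1
        have hic2 : c ≤ i + 1 := by
          by_contra hcon
          have : rng[i+1] ≤ p := by
            rw [zone_le rng hr p (i+1) hi1l]
            omega
          omega
        rw [if_pos (by omega)]
      · rw [if_neg hcond]
        rcases eq_or_ne i i0 with rfl | hne
        · exfalso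
          apply hcond
          rw [List.getD_eq_getElem _ _ hil, List.getD_eq_getElem _ _ hi1l]
          refine ⟨⟨?_, by omega, ?_⟩, hq1, hq2⟩
          · rw [← hial]
            exact sorted_getElem_mono rng hr ia i0 hia hi0len (by omega)
          · rw [← hibl]
            exact sorted_getElem_mono rng hr (i0+1) ib hi01len hib (by omega)
        · rw [if_neg hne]
    rw [List.map_congr_left hcongr, sum_ite_eq_range _ i0 hi0m]
  · rw [if_neg hp]
    apply List.sum_eq_zero
    intro x hx
    obtain ⟨i, him, rfl⟩ := List.mem_map.mp hx
    rw [List.mem_range] at him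
    have hil : i < rng.length := by omega
    have hi1l : i + 1 < rng.length := by omega
    rw [if_neg]
    rintro ⟨⟨h1, _, h3⟩, h4, h5⟩
    rw [List.getD_eq_getElem _ _ hil] at h1 h4
    rw [List.getD_eq_getElem _ _ hi1l] at h3 h5
    exact hp ⟨le_trans h1 h4, by omega⟩

-- ---------- assembly ----------
def psOf (power : List Int) : List Int := PySem.List.sorted power (fun x => x) false

def rngOf (minPower maxPower : List Int) : List Int :=
  PySem.List.sorted
    ((List.range minPower.length).foldl
      (fun acc i => acc ++ [minPower.getD i 0] ++ [maxPower.getD i 0 + 1]) [])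
    (fun x => x) false

theorem rngOf_mem (minPower maxPower : List Int) (j : Nat) (hj : j < minPower.length) :
    minPower.getD j 0 ∈ rngOf minPower maxPower
      ∧ maxPower.getD j 0 + 1 ∈ rngOf minPower maxPower := by
  have hflat : (List.range minPower.length).foldl
      (fun acc i => acc ++ [minPower.getD i 0] ++ [maxPower.getD i 0 + 1]) []
      = (List.range minPower.length).flatMap (fun i => [minPower.getD i 0] ++ [maxPower.getD i 0 + 1]) := by
    have hfn : (fun (acc : List Int) (i : Nat) => acc ++ [minPower.getD i 0] ++ [maxPower.getD i 0 + 1])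
        = (fun acc i => acc ++ ([minPower.getD i 0] ++ [maxPower.getD i 0 + 1])) := by
      funext acc i
      rw [List.append_assoc]
    rw [hfn, PySem.List.foldl_append_eq_flatMap, List.nil_append]
  constructor <;>
  · rw [rngOf, PySem.List.mem_sorted, hflat]
    apply List.mem_flatMap.mpr
    exact ⟨j, List.mem_range.mpr hj, by simp⟩

theorem rngOf_sorted (minPower maxPower : List Int) :
    List.Pairwise (· ≤ ·) (rngOf minPower maxPower) :=
  PySem.List.sorted_pairwise _ (fun x => x)

theorem psOf_sorted (power : List Int) : List.Pairwise (· ≤ ·) (psOf power) :=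
  PySem.List.sorted_pairwise _ (fun x => x)

theorem psOf_mem (power : List Int) (p : Int) : p ∈ psOf power ↔ p ∈ power :=
  PySem.List.mem_sorted _ _ _ _

theorem a_eq_ref (power minPower maxPower : List Int)
    (hpre : minPower.length ≤ maxPower.length)
    (hnd : ¬ D_processExecution power minPower maxPower) :
    processExecution power minPower maxPower
      = (minPower.zip maxPower).map (fun q =>
          refPair (PySem.List.sorted power (fun x => x) false) q.1 q.2) := by
  have hport : processExecution power minPower maxPower
      = (List.range ((rngOf minPower maxPower).length - 1)).foldl
          (fun res i => (List.range minPower.length).foldl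
            (fun r j => if (minPower.getD j 0 ≤ (rngOf minPower maxPower).getD i 0
                ∧ (rngOf minPower maxPower).getD i 0 < (rngOf minPower maxPower).getD (i+1) 0
                ∧ (rngOf minPower maxPower).getD (i+1) 0 ≤ maxPower.getD j 0 + 1)
              then r.set j [(r.getD j []).getD 0 0
                      + (sw (psOf power) (rngOf minPower maxPower) ((rngOf minPower maxPower).length - 1)).2.1.getD i 0,
                    (r.getD j []).getD 1 0
                      + (sw (psOf power) (rngOf minPower maxPower) ((rngOf minPower maxPower).length - 1)).1.getD i 0]
              else r) res)
          ((List.range minPower.length).map (fun _ => ([0, 0] : List Int))) := rfl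
  rw [hport]
  set ps := psOf power with hpsdef
  set rng := rngOf minPower maxPower with hrngdef
  set n := minPower.length with hndef
  set m := rng.length - 1 with hmdef
  have hzipn : (minPower.zip maxPower).length = n := by
    rw [List.length_zip]; omega
  -- the second loop, characterised pointwise
  have hlen : ((List.range m).foldl
      (fun res i => (List.range n).foldl
        (fun r j => if (minPower.getD j 0 ≤ rng.getD i 0 ∧ rng.getD i 0 < rng.getD (i+1) 0
            ∧ rng.getD (i+1) 0 ≤ maxPower.getD j 0 + 1)
          then r.set j [(r.getD j []).getD 0 0 + (sw ps rng m).2.1.getD i 0,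
                (r.getD j []).getD 1 0 + (sw ps rng m).1.getD i 0]
          else r) res)
      ((List.range n).map (fun _ => ([0, 0] : List Int)))).length = n :=
    (outer_fold _ _ _ n m).1
  have hget : ∀ j, j < n → ((List.range m).foldl
      (fun res i => (List.range n).foldl
        (fun r j => if (minPower.getD j 0 ≤ rng.getD i 0 ∧ rng.getD i 0 < rng.getD (i+1) 0
            ∧ rng.getD (i+1) 0 ≤ maxPower.getD j 0 + 1)
          then r.set j [(r.getD j []).getD 0 0 + (sw ps rng m).2.1.getD i 0,
                (r.getD j []).getD 1 0 + (sw ps rng m).1.getD i 0]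
          else r) res)
      ((List.range n).map (fun _ => ([0, 0] : List Int)))).getD j []
      = [((List.range m).map (fun i => if (minPower.getD j 0 ≤ rng.getD i 0 ∧ rng.getD i 0 < rng.getD (i+1) 0
            ∧ rng.getD (i+1) 0 ≤ maxPower.getD j 0 + 1) then (sw ps rng m).2.1.getD i 0 else 0)).sum,
         ((List.range m).map (fun i => if (minPower.getD j 0 ≤ rng.getD i 0 ∧ rng.getD i 0 < rng.getD (i+1) 0
            ∧ rng.getD (i+1) 0 ≤ maxPower.getD j 0 + 1) then (sw ps rng m).1.getD i 0 else 0)).sum] :=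
    fun j hj => (outer_fold _ _ _ n m).2 j hj
  -- the two global situations left open by ¬D_
  have hcases : (∀ p ∈ power, ∃ q ∈ minPower.zip maxPower, ¬(p < q.1 ∧ p < q.2 + 1))
      ∨ (∀ p ∈ power, ∀ q ∈ minPower.zip maxPower, ¬(q.1 ≤ p ∧ p ≤ q.2)) := by
    by_cases h1 : power = []
    · left; intro p hp; rw [h1] at hp; cases hp
    by_cases h2 : minPower.zip maxPower = []
    · right; intro p _ q hq; rw [h2] at hq; cases hq
    by_cases h3 : ∃ p ∈ power, ∀ q ∈ minPower.zip maxPower, p < q.1 ∧ p < q.2 + 1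
    · right
      intro p hp q hq hpq
      exact hnd ⟨h1, h2, h3, ⟨p, hp, q, hq, hpq⟩⟩
    · left
      intro p hp
      by_contra hcon
      apply h3
      refine ⟨p, hp, ?_⟩
      intro q hq
      by_contra hray
      exact hcon ⟨q, hq, hray⟩
  -- elementwise
  apply List.ext_getElem
  · rw [hlen, List.length_map, hzipn]
  intro j hj1 hj2
  have hjn : j < n := by rw [hlen] at hj1; exact hj1
  have hjmin : j < minPower.length := hjn
  have hjmax : j < maxPower.length := by omega
  rw [← List.getD_eq_getElem _ [] hj1, hget j hjn]
  rw [List.getElem_map, List.getElem_zip]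
  have hmin : minPower[j] = minPower.getD j 0 := (List.getD_eq_getElem _ _ hjmin).symm
  have hmax : maxPower[j] = maxPower.getD j 0 := (List.getD_eq_getElem _ _ hjmax).symm
  rw [hmin, hmax]
  set lo := minPower.getD j 0 with hlo
  set hi := maxPower.getD j 0 with hhi
  rcases hcases with hnb | hnr
  · -- no blocking element: the sweep counted every segment exactly
    have hblk : ∀ p ∈ ps, rng.getD 0 0 ≤ p := by
      intro p hp
      have hpw : p ∈ power := (psOf_mem power p).mp hp
      obtain ⟨q, hq, hqprop⟩ := hnb p hpw
      obtain ⟨jq, hjq, hjqe⟩ := List.mem_iff_getElem.mp hq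
      have hjqn : jq < n := by rw [hzipn] at hjq; exact hjq
      have hq1 : q.1 = minPower.getD jq 0 := by
        rw [← hjqe, List.getElem_zip]
        exact (List.getD_eq_getElem _ _ hjqn).symm
      have hq2 : q.2 = maxPower.getD jq 0 := by
        rw [← hjqe, List.getElem_zip]
        exact (List.getD_eq_getElem _ _ (by omega : jq < maxPower.length)).symm
      obtain ⟨hm1, hm2⟩ := rngOf_mem minPower maxPower jq hjqn
      have hble : ∃ b ∈ rng, b ≤ p := by
        rcases not_and_or.mp hqprop with hcase | hcase
        · exact ⟨q.1, by rw [hq1]; exact hm1, by omega⟩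
        · exact ⟨q.2 + 1, by rw [hq2]; exact hm2, by omega⟩
      obtain ⟨b, hbmem, hbp⟩ := hble
      obtain ⟨kb, hkb, hkbe⟩ := List.mem_iff_getElem.mp hbmem
      have h0len : 0 < rng.length := by omega
      rw [List.getD_eq_getElem _ _ h0len]
      have := sorted_getElem_mono rng (rngOf_sorted minPower maxPower) 0 kb h0len hkb (by omega)
      omega
    have hr := rngOf_sorted minPower maxPower
    have hs := psOf_sorted power
    obtain ⟨hm1, hm2⟩ := rngOf_mem minPower maxPower j hjn
    obtain ⟨ia, hia, hiae⟩ := List.mem_iff_getElem.mp hm1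
    obtain ⟨ib, hib, hibe⟩ := List.mem_iff_getElem.mp hm2
    have hseg : ∀ i ∈ List.range m,
        ((sw ps rng m).2.1.getD i 0
            = (ps.countP (fun p => decide (rng.getD i 0 ≤ p ∧ p < rng.getD (i+1) 0)) : Int))
        ∧ ((sw ps rng m).1.getD i 0
            = (ps.filter (fun p => decide (rng.getD i 0 ≤ p ∧ p < rng.getD (i+1) 0))).sum) := by
      intro i hi'
      rw [List.mem_range] at hi'
      have hil : i < rng.length := by omega
      have hi1l : i + 1 < rng.length := by omega
      have hse : rng.getD i 0 ≤ rng.getD (i+1) 0 := by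
        rw [List.getD_eq_getElem _ _ hil, List.getD_eq_getElem _ _ hi1l]
        exact sorted_getElem_mono rng hr i (i+1) hil hi1l (by omega)
      obtain ⟨he1, he2⟩ := sw_entries ps rng hs hr hblk i hi'
      rw [← mid_eq_filter ps hs _ _ hse] at he1 he2
      rw [he1, he2, List.countP_eq_length_filter]
      exact ⟨rfl, rfl⟩
    have hcount : ((List.range m).map (fun i => if (lo ≤ rng.getD i 0 ∧ rng.getD i 0 < rng.getD (i+1) 0
          ∧ rng.getD (i+1) 0 ≤ hi + 1) then (sw ps rng m).2.1.getD i 0 else 0)).sum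
        = (ps.countP (fun p => decide (lo ≤ p ∧ p ≤ hi)) : Int) := by
      rw [List.map_congr_left (fun i hi' => by
        rw [(hseg i hi').1] :
        ∀ i ∈ List.range m, _ = (if (lo ≤ rng.getD i 0 ∧ rng.getD i 0 < rng.getD (i+1) 0
          ∧ rng.getD (i+1) 0 ≤ hi + 1) then (ps.countP (fun p => decide (rng.getD i 0 ≤ p ∧ p < rng.getD (i+1) 0)) : Int) else 0))]
      rw [sum_swap_count m
        (fun i => lo ≤ rng.getD i 0 ∧ rng.getD i 0 < rng.getD (i+1) 0 ∧ rng.getD (i+1) 0 ≤ hi + 1)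
        (fun i p => rng.getD i 0 ≤ p ∧ p < rng.getD (i+1) 0) ps]
      rw [List.map_congr_left (fun p _ => by
        rw [part_point rng hr lo hi ia hia hiae ib hib hibe p] :
        ∀ p ∈ ps, _ = (if lo ≤ p ∧ p ≤ hi then (1:Int) else 0))]
      rw [List.map_congr_left (fun p _ => by
        by_cases h : lo ≤ p ∧ p ≤ hi <;> simp [h] :
        ∀ p ∈ ps, (if lo ≤ p ∧ p ≤ hi then (1:Int) else 0)
          = (if (fun x => decide (lo ≤ x ∧ x ≤ hi)) p = true then (1:Int) else 0))]
      rw [PySem.List.sum_map_ite_one_zero (fun x => decide (lo ≤ x ∧ x ≤ hi)) ps]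
    have hsum : ((List.range m).map (fun i => if (lo ≤ rng.getD i 0 ∧ rng.getD i 0 < rng.getD (i+1) 0
          ∧ rng.getD (i+1) 0 ≤ hi + 1) then (sw ps rng m).1.getD i 0 else 0)).sum
        = (ps.filter (fun p => decide (lo ≤ p ∧ p ≤ hi))).sum := by
      rw [List.map_congr_left (fun i hi' => by
        rw [(hseg i hi').2] :
        ∀ i ∈ List.range m, _ = (if (lo ≤ rng.getD i 0 ∧ rng.getD i 0 < rng.getD (i+1) 0
          ∧ rng.getD (i+1) 0 ≤ hi + 1) then (ps.filter (fun p => decide (rng.getD i 0 ≤ p ∧ p < rng.getD (i+1) 0))).sum else 0))]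
      rw [sum_swap_sum m
        (fun i => lo ≤ rng.getD i 0 ∧ rng.getD i 0 < rng.getD (i+1) 0 ∧ rng.getD (i+1) 0 ≤ hi + 1)
        (fun i p => rng.getD i 0 ≤ p ∧ p < rng.getD (i+1) 0) ps]
      rw [List.map_congr_left (fun p _ => by
        rw [List.map_congr_left (fun i _ => by
          by_cases h : (lo ≤ rng.getD i 0 ∧ rng.getD i 0 < rng.getD (i+1) 0 ∧ rng.getD (i+1) 0 ≤ hi + 1)
              ∧ (rng.getD i 0 ≤ p ∧ p < rng.getD (i+1) 0) <;> simp [h] :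
          ∀ i ∈ List.range m, (if (lo ≤ rng.getD i 0 ∧ rng.getD i 0 < rng.getD (i+1) 0 ∧ rng.getD (i+1) 0 ≤ hi + 1)
              ∧ (rng.getD i 0 ≤ p ∧ p < rng.getD (i+1) 0) then p else 0)
            = p * (if (lo ≤ rng.getD i 0 ∧ rng.getD i 0 < rng.getD (i+1) 0 ∧ rng.getD (i+1) 0 ≤ hi + 1)
              ∧ (rng.getD i 0 ≤ p ∧ p < rng.getD (i+1) 0) then (1:Int) else 0))]
        rw [List.sum_map_mul_left, part_point rng hr lo hi ia hia hiae ib hib hibe p]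
        by_cases h : lo ≤ p ∧ p ≤ hi <;> simp [h] :
        ∀ p ∈ ps, ((List.range m).map (fun i => if (lo ≤ rng.getD i 0 ∧ rng.getD i 0 < rng.getD (i+1) 0
            ∧ rng.getD (i+1) 0 ≤ hi + 1) ∧ (rng.getD i 0 ≤ p ∧ p < rng.getD (i+1) 0) then p else 0)).sum
          = (if lo ≤ p ∧ p ≤ hi then p else 0))]
      exact sum_map_ite_self (fun p => lo ≤ p ∧ p ≤ hi) ps
    rw [hcount, hsum]
    rfl
  · -- no power in any query range: every selected segment is empty and the reference is zero
    have hq : (lo, hi) ∈ minPower.zip maxPower := by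
      have : (minPower.zip maxPower)[j]'(by omega) = (lo, hi) := by
        rw [List.getElem_zip, hlo, hhi, List.getD_eq_getElem _ _ hjmin, List.getD_eq_getElem _ _ hjmax]
      rw [← this]
      exact List.getElem_mem _
    have hnrj : ∀ p ∈ ps, ¬(lo ≤ p ∧ p ≤ hi) := by
      intro p hp
      exact hnr p ((psOf_mem power p).mp hp) (lo, hi) hq
    have hzero1 : ((List.range m).map (fun i => if (lo ≤ rng.getD i 0 ∧ rng.getD i 0 < rng.getD (i+1) 0
          ∧ rng.getD (i+1) 0 ≤ hi + 1) then (sw ps rng m).2.1.getD i 0 else 0)).sum = 0 := by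
      apply List.sum_eq_zero
      intro x hx
      obtain ⟨i, hi', rfl⟩ := List.mem_map.mp hx
      rw [List.mem_range] at hi'
      by_cases hsel : lo ≤ rng.getD i 0 ∧ rng.getD i 0 < rng.getD (i+1) 0 ∧ rng.getD (i+1) 0 ≤ hi + 1
      · rw [if_pos hsel]
        rw [(sw_getD ps rng i m hi').2]
        rw [whileConsume_empty ps _ _ (by
          rintro p hp ⟨hp1, hp2⟩
          exact hnrj p hp ⟨le_trans hsel.1 hp1, by omega⟩)]
      · rw [if_neg hsel]
    have hzero2 : ((List.range m).map (fun i => if (lo ≤ rng.getD i 0 ∧ rng.getD i 0 < rng.getD (i+1) 0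
          ∧ rng.getD (i+1) 0 ≤ hi + 1) then (sw ps rng m).1.getD i 0 else 0)).sum = 0 := by
      apply List.sum_eq_zero
      intro x hx
      obtain ⟨i, hi', rfl⟩ := List.mem_map.mp hx
      rw [List.mem_range] at hi'
      by_cases hsel : lo ≤ rng.getD i 0 ∧ rng.getD i 0 < rng.getD (i+1) 0 ∧ rng.getD (i+1) 0 ≤ hi + 1
      · rw [if_pos hsel]
        rw [(sw_getD ps rng i m hi').1]
        rw [whileConsume_empty ps _ _ (by
          rintro p hp ⟨hp1, hp2⟩
          exact hnrj p hp ⟨le_trans hsel.1 hp1, by omega⟩)]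
      · rw [if_neg hsel]
    rw [hzero1, hzero2]
    unfold refPair
    rw [List.countP_eq_zero.mpr (by intro p hp; simp only [decide_eq_true_eq]; exact hnrj p hp),
        List.filter_eq_nil_iff.mpr (by intro p hp; simp only [decide_eq_true_eq]; exact hnrj p hp)]
    rfl

-- ===== VERDICT (by name: the statement is the Claim_ definition above) =====
theorem processExecution_spec : Claim_unchanged_processExecution := by
  intro power minPower maxPower _ hpre
  intro hnd
  rw [a_eq_ref power minPower maxPower hpre hnd, alt_eq_ref]

theorem processExecution_changed : Claim_changed_processExecution := by
  unfold Claim_changed_processExecution; decide
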